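-- pv_equiv track=rewrite | github.com/RafaelUnltd/sudoku-genetico | main.py | getCrossoverMask
-- ===== SOURCE A (Python) =====
-- def getCrossoverMask(sudoku):
--     mask = []
--     number = 1
--     for i in range(len(sudoku)):
--         mask.append([])
--         for j in range(len(sudoku)):
--             if sudoku[i][j] != 0:
--                 mask[i].append(0)
--             else:
--                 mask[i].append(number)
--                 if number == 1:
--                     number = 2
--                 else:
--                     number = 1
--     return mask
-- ===== SOURCE B (Python) =====
-- def getCrossoverMask(sudoku):
--     n = len(sudoku)
--     # Pass 1: per row, the column indices of the empty cells of the n x n grid.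
--     empties = [[j for j in range(n) if row[j] == 0] for row in sudoku]
--     # Pass 2: stamp alternating labels into preallocated zero rows; the label of
--     # the k-th empty cell of the grid (reading order) is 1 + k % 2.
--     mask = []
--     seen = 0
--     for row_empties in empties:
--         mrow = [0] * n
--         for k, j in enumerate(row_empties):
--             mrow[j] = 1 + (seen + k) % 2
--         mask.append(mrow)
--         seen += len(row_empties)
--     return mask
-- ===== Notes on version B (the rewrite author's own statement) =====
-- stated objective: alternative
-- what changed: Replaces the single stateful pass (append 0 or the toggled 1/2 per cell) by a two-phase algorithm: a first pass collects the column indices of the empty cells of each row, then a second pass stamps 1 + k % 2 for the k-th empty cell into preallocated all-zero rows, so there is no per-cell branch, no toggle variable and no cell-by-cell appending; Pre_ excludes inputs where some row is shorter than len(sudoku), on which A raises IndexError.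
import Mathlib
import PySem

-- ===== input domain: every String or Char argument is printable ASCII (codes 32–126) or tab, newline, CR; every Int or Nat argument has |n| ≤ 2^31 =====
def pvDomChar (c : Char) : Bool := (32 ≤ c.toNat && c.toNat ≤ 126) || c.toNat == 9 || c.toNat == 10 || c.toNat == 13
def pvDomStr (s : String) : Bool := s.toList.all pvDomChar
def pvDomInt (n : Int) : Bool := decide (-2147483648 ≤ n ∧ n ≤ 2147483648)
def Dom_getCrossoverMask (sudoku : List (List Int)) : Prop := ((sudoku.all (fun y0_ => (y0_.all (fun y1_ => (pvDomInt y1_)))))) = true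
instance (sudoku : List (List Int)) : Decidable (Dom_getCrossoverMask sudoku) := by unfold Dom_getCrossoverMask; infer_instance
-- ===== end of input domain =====

-- B is a two-phase algorithm: pass 1 lists the empty-cell column indices per row, pass 2 stamps
-- alternating labels 1+(k%2) into preallocated zero rows — no per-cell branch or toggle (objective: alternative).


-- ===== PORT A =====
def getCrossoverMask (sudoku : List (List Int)) : List (List Int) :=
  let n : Int := (sudoku.length : Int)
  ((PySem.List.pyRange 0 n 1).foldl (fun (st : List (List Int) × Int) i =>
      (PySem.List.pyRange 0 n 1).foldl (fun (st : List (List Int) × Int) j =>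
          match PySem.List.pyGet? sudoku i with
          | none => st
          | some row =>
            match PySem.List.pyGet? row j with
            | none => st   -- Python raises IndexError here; excluded by Pre_
            | some v =>
              if v ≠ 0 then (st.1.modify i.toNat (fun r => r ++ [0]), st.2)
              else (st.1.modify i.toNat (fun r => r ++ [st.2]),
                    if st.2 = 1 then 2 else 1))
        (st.1 ++ [[]], st.2))
    ([], 1)).1

-- ===== PORT B =====
-- pass 1 helper: [j for j in range(n) if row[j] == 0]
def emptyPositions (n : Int) (row : List Int) : List Int :=
  (PySem.List.pyRange 0 n 1).foldl (fun acc j =>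
    match PySem.List.pyGet? row j with
    | none => acc          -- IndexError in Python; excluded by Pre_
    | some v => if v = 0 then acc ++ [j] else acc) []

-- pass 2 helper: mrow = [0]*n; for k, j in enumerate(row_empties): mrow[j] = 1 + (seen + k) % 2
def stampRow (n : Int) (rowE : List Int) (seen : Int) : List Int :=
  (PySem.List.enumerate rowE).foldl
    (fun mrow kj => mrow.modify kj.2.toNat (fun _ => 1 + PySem.Int.mod (seen + kj.1) 2))
    (List.replicate n.toNat 0)

def getCrossoverMask_alt (sudoku : List (List Int)) : List (List Int) :=
  let n : Int := (sudoku.length : Int)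
  let empties := sudoku.map (fun row => emptyPositions n row)
  (empties.foldl (fun (st : List (List Int) × Int) rowE =>
      (st.1 ++ [stampRow n rowE st.2], st.2 + (rowE.length : Int))) ([], 0)).1

-- ===== PRECONDITION & SPEC =====
-- A indexes every row at j = 0 .. len(sudoku)-1, so it raises IndexError iff some row is
-- shorter than len(sudoku); exactly those inputs are excluded.
def Pre_getCrossoverMask (sudoku : List (List Int)) : Prop :=
  ∀ row ∈ sudoku, sudoku.length ≤ row.length
instance (sudoku : List (List Int)) : Decidable (Pre_getCrossoverMask sudoku) := by
  unfold Pre_getCrossoverMask; infer_instance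
def pvWitness_getCrossoverMask : List (List Int) := [[1, 0], [0, 5]]

def Spec_getCrossoverMask (sudoku : List (List Int)) (out : List (List Int)) : Prop :=
  out = getCrossoverMask_alt sudoku
instance (sudoku : List (List Int)) (out : List (List Int)) : Decidable (Spec_getCrossoverMask sudoku out) := by
  unfold Spec_getCrossoverMask; infer_instance

-- ===== CLAIM =====
def Claim_equal_getCrossoverMask : Prop := ∀ (sudoku : List (List Int)), Dom_getCrossoverMask sudoku → Pre_getCrossoverMask sudoku → Spec_getCrossoverMask sudoku (getCrossoverMask sudoku)

-- ===== LEMMAS AND PROOFS =====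

-- reference semantics: one row, threading the running count c of empties seen so far
def specRow : List Int → Int → List Int × Int
  | [], c => ([], c)
  | x :: t, c =>
    if x ≠ 0 then
      let p := specRow t c; (0 :: p.1, p.2)
    else
      let p := specRow t (c + 1); ((1 + PySem.Int.mod c 2) :: p.1, p.2)

-- reference semantics: whole grid
def build : List (List Int) → Int → List (List Int)
  | [], _ => []
  | r :: t, c => (specRow r c).1 :: build t (specRow r c).2

-- ---- A side (loops over indices with the 1<->2 toggle) ----

def stepAcell (st : List Int × Int) (v : Int) : List Int × Int :=
  if v ≠ 0 then (st.1 ++ [0], st.2) else (st.1 ++ [st.2], if st.2 = 1 then 2 else 1)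

def rowFold (cells : List Int) (st : List Int × Int) : List Int × Int :=
  cells.foldl stepAcell st

def rowsA (n : Nat) (rows : List (List Int)) (st : List (List Int) × Int) : List (List Int) × Int :=
  rows.foldl (fun st row =>
    ((st.1 ++ [(rowFold (row.take n) ([], st.2)).1]), (rowFold (row.take n) ([], st.2)).2)) st

lemma modify_snoc (l : List (List Int)) (a : List Int) (f : List Int → List Int) :
    (l ++ [a]).modify l.length f = l ++ [f a] := by
  rw [List.modify_eq_take_drop]; simp

lemma parity_step (c num : Int) (hn : num = 1 + PySem.Int.mod c 2) :
    (if num = 1 then (2:Int) else 1) = 1 + PySem.Int.mod (c + 1) 2 := by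
  have h1 : 0 ≤ PySem.Int.mod c 2 := PySem.Int.mod_nonneg _ (by norm_num)
  have h2 : PySem.Int.mod c 2 < 2 := PySem.Int.mod_lt _ (by norm_num)
  have h3 : 0 ≤ PySem.Int.mod (c+1) 2 := PySem.Int.mod_nonneg _ (by norm_num)
  have h4 : PySem.Int.mod (c+1) 2 < 2 := PySem.Int.mod_lt _ (by norm_num)
  have e1 := PySem.Int.floordiv_mul_add_mod c 2
  have e2 := PySem.Int.floordiv_mul_add_mod (c+1) 2
  rcases (by omega : PySem.Int.mod c 2 = 0 ∨ PySem.Int.mod c 2 = 1) with h | h <;>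
    rw [h] at hn <;> subst hn <;> norm_num <;> omega

lemma inner_eq (row : List Int) (k : Nat) (hk : k ≤ row.length)
    (mask : List (List Int)) (cur : List Int) (num : Int) (idx : Nat) (hidx : idx = mask.length) :
    (PySem.List.pyRange 0 (k : Int) 1).foldl
      (fun (st : List (List Int) × Int) j =>
        match PySem.List.pyGet? row j with
        | none => st
        | some v =>
          if v ≠ 0 then (st.1.modify idx (fun r => r ++ [0]), st.2)
          else (st.1.modify idx (fun r => r ++ [st.2]), if st.2 = 1 then 2 else 1))
      (mask ++ [cur], num)
    = (mask ++ [(rowFold (row.take k) (cur, num)).1], (rowFold (row.take k) (cur, num)).2) := by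
  subst hidx
  induction k generalizing cur num with
  | zero =>
    simp [PySem.List.pyRange, rowFold]
  | succ k ih =>
    have hcast : ((k + 1 : Nat) : Int) = (k : Int) + 1 := by push_cast; ring
    rw [hcast, PySem.List.pyRange_one_succ_right (by positivity), List.foldl_append, ih (by omega)]
    have hk' : k < row.length := by omega
    have hget : PySem.List.pyGet? row (k : Int) = some row[k] := by
      simp [PySem.List.pyGet?_natCast, List.getElem?_eq_getElem hk']
    simp only [List.foldl_cons, List.foldl_nil, hget]
    have htake : row.take (k+1) = row.take k ++ [row[k]] := by
      rw [List.take_add_one]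
      simp [List.getElem?_eq_getElem hk']
    rw [htake]
    simp only [rowFold, List.foldl_append, List.foldl_cons, List.foldl_nil, stepAcell]
    by_cases hv : row[k] ≠ 0
    · rw [if_pos hv, if_pos hv, modify_snoc]
    · rw [if_neg hv, if_neg hv, modify_snoc]
      rfl

lemma rowsA_fst_length (n : Nat) (rows : List (List Int)) (st : List (List Int) × Int) :
    (rowsA n rows st).1.length = st.1.length + rows.length := by
  induction rows generalizing st with
  | nil => simp [rowsA]
  | cons r t ih =>
    simp only [rowsA, List.foldl_cons] at *
    rw [ih]; simp; omega

lemma outer_eq (sudoku : List (List Int)) (hpre : Pre_getCrossoverMask sudoku)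
    (m : Nat) (hm : m ≤ sudoku.length) :
    (PySem.List.pyRange 0 (m : Int) 1).foldl
      (fun (st : List (List Int) × Int) i =>
        (PySem.List.pyRange 0 (sudoku.length : Int) 1).foldl
          (fun (st : List (List Int) × Int) j =>
            match PySem.List.pyGet? sudoku i with
            | none => st
            | some row =>
              match PySem.List.pyGet? row j with
              | none => st
              | some v =>
                if v ≠ 0 then (st.1.modify i.toNat (fun r => r ++ [0]), st.2)
                else (st.1.modify i.toNat (fun r => r ++ [st.2]),
                      if st.2 = 1 then 2 else 1))
          (st.1 ++ [[]], st.2))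
      ([], 1)
    = rowsA sudoku.length (sudoku.take m) ([], 1) := by
  induction m with
  | zero => simp [PySem.List.pyRange, rowsA]
  | succ m ih =>
    have hm' : m ≤ sudoku.length := by omega
    have hmlt : m < sudoku.length := by omega
    have hcast : ((m + 1 : Nat) : Int) = (m : Int) + 1 := by push_cast; ring
    rw [hcast, PySem.List.pyRange_one_succ_right (by positivity), List.foldl_append, ih hm']
    simp only [List.foldl_cons, List.foldl_nil]
    have hget : PySem.List.pyGet? sudoku (m : Int) = some sudoku[m] := by
      simp [PySem.List.pyGet?_natCast, List.getElem?_eq_getElem hmlt]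
    simp only [hget, Int.toNat_natCast]
    have hlen : (rowsA sudoku.length (sudoku.take m) ([], 1)).1.length = m := by
      rw [rowsA_fst_length]; simp [hm']
    rw [inner_eq sudoku[m] sudoku.length (hpre _ (List.getElem_mem hmlt)) _ [] _ m hlen.symm]
    have htake : sudoku.take (m+1) = sudoku.take m ++ [sudoku[m]] := by
      rw [List.take_add_one]; simp [List.getElem?_eq_getElem hmlt]
    rw [htake]
    simp only [rowsA, List.foldl_append, List.foldl_cons, List.foldl_nil]

-- A's toggle row fold computes specRow
lemma rowA (cells : List Int) (acc : List Int) (c num : Int) (hn : num = 1 + PySem.Int.mod c 2) :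
    rowFold cells (acc, num)
      = (acc ++ (specRow cells c).1, 1 + PySem.Int.mod (specRow cells c).2 2) := by
  induction cells generalizing acc c num with
  | nil => simp [rowFold, specRow, hn]
  | cons x t ih =>
    simp only [rowFold, List.foldl_cons, stepAcell, specRow] at *
    by_cases hx : x ≠ 0
    · rw [if_pos hx, if_pos hx]
      rw [ih (acc ++ [0]) c num hn]; simp
    · rw [if_neg hx, if_neg hx]
      subst hn
      rw [ih (acc ++ [1 + PySem.Int.mod c 2]) (c + 1) _ (parity_step c _ rfl)]
      simp

lemma rowsA_build (n : Nat) (rows : List (List Int)) (acc : List (List Int)) (c num : Int)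
    (hn : num = 1 + PySem.Int.mod c 2) :
    (rowsA n rows (acc, num)).1 = acc ++ build (rows.map (·.take n)) c := by
  induction rows generalizing acc c num with
  | nil => simp [rowsA, build]
  | cons r t ih =>
    simp only [rowsA, List.foldl_cons, List.map_cons, build] at *
    rw [rowA (r.take n) [] c num hn]
    simp only [List.nil_append]
    rw [ih (acc ++ [(specRow (r.take n) c).1]) (specRow (r.take n) c).2 _ rfl]
    simp

-- ---- B side ----

-- structural description of pass 1: indices (from i) of the zero entries
def zeroIdx : List Int → Nat → List Nat
  | [], _ => []
  | x :: t, i => if x = 0 then i :: zeroIdx t (i + 1) else zeroIdx t (i + 1)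

lemma zeroIdx_snoc (l : List Int) (x : Int) (i : Nat) :
    zeroIdx (l ++ [x]) i = zeroIdx l i ++ (if x = 0 then [i + l.length] else []) := by
  induction l generalizing i with
  | nil => simp [zeroIdx]
  | cons y t ih =>
    simp only [List.cons_append, zeroIdx, ih (i + 1), List.length_cons]
    split_ifs <;> simp <;> omega

lemma emptyPositions_eq (row : List Int) (k : Nat) (hk : k ≤ row.length) (acc : List Int) :
    (PySem.List.pyRange 0 (k : Int) 1).foldl (fun acc j =>
        match PySem.List.pyGet? row j with
        | none => acc
        | some v => if v = 0 then acc ++ [j] else acc) acc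
      = acc ++ (zeroIdx (row.take k) 0).map (fun j : Nat => (j : Int)) := by
  induction k generalizing acc with
  | zero => simp [PySem.List.pyRange, zeroIdx]
  | succ k ih =>
    have hcast : ((k + 1 : Nat) : Int) = (k : Int) + 1 := by push_cast; ring
    rw [hcast, PySem.List.pyRange_one_succ_right (by positivity), List.foldl_append, ih (by omega)]
    have hk' : k < row.length := by omega
    have hget : PySem.List.pyGet? row (k : Int) = some row[k] := by
      simp [PySem.List.pyGet?_natCast, List.getElem?_eq_getElem hk']
    have htake : row.take (k+1) = row.take k ++ [row[k]] := by
      rw [List.take_add_one]; simp [List.getElem?_eq_getElem hk']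
    simp only [List.foldl_cons, List.foldl_nil, hget, htake, zeroIdx_snoc]
    by_cases hv : row[k] = 0
    · rw [if_pos hv, if_pos hv]
      simp [List.length_take, Nat.min_eq_left (le_of_lt hk')]
    · rw [if_neg hv, if_neg hv]; simp

lemma modify_append_cons (l : List Int) (y : Int) (r : List Int) (f : Int → Int) :
    (l ++ y :: r).modify l.length f = l ++ f y :: r := by
  rw [List.modify_eq_take_drop]; simp

-- stamping the zero positions of `cells` into a zero block after `prefix` yields specRow
lemma stamp_spec (cells : List Int) (prefix_ : List Int) (s : Int) :
    (PySem.List.enumerate ((zeroIdx cells prefix_.length).map (fun j : Nat => (j : Int))) 0).foldl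
        (fun mrow kj => mrow.modify kj.2.toNat (fun _ => 1 + PySem.Int.mod (s + kj.1) 2))
        (prefix_ ++ List.replicate cells.length 0)
      = prefix_ ++ (specRow cells s).1 := by
  induction cells generalizing prefix_ s with
  | nil => simp [zeroIdx, specRow]
  | cons x t ih =>
    have hrep : List.replicate (x :: t).length (0:Int) = 0 :: List.replicate t.length 0 := by
      simp [List.replicate_succ]
    by_cases hx : x = 0
    · have hz : zeroIdx (x :: t) prefix_.length
          = prefix_.length :: zeroIdx t (prefix_.length + 1) := by simp [zeroIdx, hx]
      rw [hz, hrep, List.map_cons, PySem.List.enumerate_cons, List.foldl_cons]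
      have hmod : (prefix_ ++ (0:Int) :: List.replicate t.length 0).modify
          ((prefix_.length : Int)).toNat (fun _ => 1 + PySem.Int.mod (s + 0) 2)
          = (prefix_ ++ [1 + PySem.Int.mod s 2]) ++ List.replicate t.length 0 := by
        rw [Int.toNat_natCast, modify_append_cons]; simp
      rw [hmod]
      have hshift : ∀ (ps : List Int) (m : List Int) (a : Int),
          (PySem.List.enumerate ps (a + 1)).foldl
            (fun mrow kj => mrow.modify kj.2.toNat (fun _ => 1 + PySem.Int.mod (s + kj.1) 2)) m
          = (PySem.List.enumerate ps a).foldl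
            (fun mrow kj => mrow.modify kj.2.toNat (fun _ => 1 + PySem.Int.mod ((s+1) + kj.1) 2)) m := by
        intro ps
        induction ps with
        | nil => intro m a; simp [PySem.List.enumerate]
        | cons p pt ihp =>
          intro m a
          simp only [PySem.List.enumerate_cons, List.foldl_cons]
          rw [ihp]
          ring_nf
      have hlen : prefix_.length + 1 = (prefix_ ++ [1 + PySem.Int.mod s 2]).length := by simp
      rw [show (0:Int) + 1 = 0 + 1 from rfl, hshift, hlen,
          ih (prefix_ ++ [1 + PySem.Int.mod s 2]) (s + 1)]
      simp [specRow, hx]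
    · have hz : zeroIdx (x :: t) prefix_.length = zeroIdx t (prefix_.length + 1) := by
        simp [zeroIdx, hx]
      have hlen : prefix_.length + 1 = (prefix_ ++ [(0:Int)]).length := by simp
      rw [hz, hrep, show prefix_ ++ (0:Int) :: List.replicate t.length 0
            = (prefix_ ++ [0]) ++ List.replicate t.length 0 by simp,
          hlen, ih (prefix_ ++ [0]) s]
      simp [specRow, hx]

lemma zeroIdx_length (cells : List Int) (i j : Nat) :
    (zeroIdx cells i).length = (zeroIdx cells j).length := by
  induction cells generalizing i j with
  | nil => rfl
  | cons x t ih => simp only [zeroIdx]; split_ifs <;> simp [ih (i+1) (j+1)]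

lemma specRow_snd (cells : List Int) (c : Int) :
    (specRow cells c).2 = c + ((zeroIdx cells 0).length : Int) := by
  induction cells generalizing c with
  | nil => simp [specRow, zeroIdx]
  | cons x t ih =>
    by_cases hx : x = 0
    · have h1 : (specRow (x :: t) c).2 = (specRow t (c + 1)).2 := by
        simp [specRow, hx]
      have h2 : zeroIdx (x :: t) 0 = 0 :: zeroIdx t 1 := by simp [zeroIdx, hx]
      rw [h1, h2, ih (c + 1), zeroIdx_length t 0 1]
      simp; omega
    · have h1 : (specRow (x :: t) c).2 = (specRow t c).2 := by
        simp [specRow, hx]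
      have h2 : zeroIdx (x :: t) 0 = zeroIdx t 1 := by simp [zeroIdx, hx]
      rw [h1, h2, ih c, zeroIdx_length t 0 1]

lemma alt_build (n : Nat) (rows : List (List Int)) (hrows : ∀ row ∈ rows, n ≤ row.length)
    (acc : List (List Int)) (c : Int) :
    ((rows.map (fun row => emptyPositions (n : Int) row)).foldl
        (fun (st : List (List Int) × Int) rowE =>
          (st.1 ++ [stampRow (n : Int) rowE st.2], st.2 + (rowE.length : Int))) (acc, c)).1
      = acc ++ build (rows.map (·.take n)) c := by
  induction rows generalizing acc c with
  | nil => simp [build]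
  | cons r t ih =>
    simp only [List.map_cons, List.foldl_cons, build]
    have hr : n ≤ r.length := hrows r (by simp)
    have hep : emptyPositions (n : Int) r = (zeroIdx (r.take n) 0).map (fun j : Nat => (j : Int)) := by
      have := emptyPositions_eq r n hr []
      simpa [emptyPositions] using this
    have hcells : (r.take n).length = n := by simp [Nat.min_eq_left hr]
    have hstamp : stampRow (n : Int) (emptyPositions (n : Int) r) c = (specRow (r.take n) c).1 := by
      have h := stamp_spec (r.take n) [] c
      simp only [List.length_nil, List.nil_append] at h
      rw [hcells] at h
      rw [stampRow, hep, Int.toNat_natCast]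
      exact h
    have hcnt : c + ((emptyPositions (n : Int) r).length : Int) = (specRow (r.take n) c).2 := by
      rw [hep, specRow_snd]; simp
    rw [ih (fun row hm => hrows row (by simp [hm])) (acc ++ [stampRow (n : Int) (emptyPositions (n : Int) r) c]) _]
    rw [hstamp, hcnt]
    simp

-- ===== VERDICT =====
theorem getCrossoverMask_spec : Claim_equal_getCrossoverMask := by
  intro sudoku _hdom hpre
  simp only [Spec_getCrossoverMask, getCrossoverMask, getCrossoverMask_alt]
  rw [outer_eq sudoku hpre sudoku.length le_rfl, List.take_length]
  rw [rowsA_build sudoku.length sudoku [] 0 1 (by decide)]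
  rw [alt_build sudoku.length sudoku hpre [] 0]
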